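-- pv_equiv track=rewrite | github.com/HyunSung-Na/TIL-algorism | 알고리즘/11번가_1.py | solution
-- ===== SOURCE A (Python) =====
-- def solution(S):
--     answer = 0
--     stack = []
--     for word in S:
--         if word == 'a':
--             stack.append(word)
--         else:
--             if len(stack) < 2:
--                 while len(stack) < 2:
--                     answer += 1
--                     stack.append('a')
--                 stack = []
--             else:
--                 stack = []
--         if len(stack) >= 3:
--             return -1
--     if S[-1] != 'a':
--         answer += 2
--     return answer
-- ===== SOURCE B (Python) =====
-- def solution(S):
--     # closed-form arithmetic: -1 iff 'aaa' occurs; otherwise every a-run has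
--     # length <= 2, so each of the (len-na) breaks costs 2 minus the a-run
--     # before it, and those runs together hold all 'a's except the trailing run
--     if 'aaa' in S:
--         return -1
--     n = len(S)
--     na = S.count('a')
--     tail = n - len(S.rstrip('a'))
--     answer = 2 * (n - na) - (na - tail)
--     if not S.endswith('a'):
--         answer += 2
--     return answer
-- ===== Notes on version B (the rewrite author's own statement) =====
-- stated objective: simpler
-- what changed: A simulates a character stack with an inner while-loop pushing filler characters per break; B has no per-character Python loop at all: it tests substring membership for the -1 case and otherwise computes the answer by a closed arithmetic formula over C-implemented string built-ins (len, count, rstrip, endswith).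
import Mathlib
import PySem

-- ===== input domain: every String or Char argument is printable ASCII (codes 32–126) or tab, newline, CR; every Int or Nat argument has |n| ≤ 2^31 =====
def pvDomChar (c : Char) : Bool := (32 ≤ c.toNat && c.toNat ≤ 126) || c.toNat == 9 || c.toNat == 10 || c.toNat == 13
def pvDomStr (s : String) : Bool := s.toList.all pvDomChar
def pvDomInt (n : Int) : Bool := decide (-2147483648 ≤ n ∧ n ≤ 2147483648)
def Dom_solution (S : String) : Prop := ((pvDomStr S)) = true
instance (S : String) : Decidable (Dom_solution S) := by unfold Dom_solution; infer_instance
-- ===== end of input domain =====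

-- B replaces A's character-by-character stack simulation by a loop-free closed
-- form over string built-ins: substring test for 'aaa', then an arithmetic
-- formula in len, count('a') and the trailing-'a' run length (objective: simpler).

-- ===== PORT A =====
-- the inner 'while len(stack) < 2: answer += 1; stack.append("a")' loop
def aWhile (answer : Int) (stack : List Char) : Int × List Char :=
  if stack.length < 2 then aWhile (answer + 1) (stack ++ ['a'])
  else (answer, stack)
termination_by 2 - stack.length
decreasing_by simp_all; omega

-- the 'for word in S' loop; .inl r = early 'return -1', .inr answer = loop completed
def aLoop : List Char → Int → List Char → Sum Int Int
  | [], answer, _ => .inr answer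
  | c :: rest, answer, stack =>
    let p : Int × List Char :=
      if c = 'a' then (answer, stack ++ [c])
      else if stack.length < 2 then ((aWhile answer stack).1, [])
      else (answer, [])
    if p.2.length ≥ 3 then .inl (-1) else aLoop rest p.1 p.2

def solution (S : String) : Int :=
  match aLoop S.toList 0 [] with
  | .inl r => r
  | .inr answer =>
    match PySem.Str.pyGet? S (-1) with
    | none => answer   -- unreachable under Pre_solution: Python raises IndexError on S = ''
    | some c => if c ≠ 'a' then answer + 2 else answer

-- ===== PORT B =====
-- exact hand port of Python's S.rstrip('a') (PySem has no char-argument rstrip)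
def pyRstripA (S : String) : String :=
  String.ofList ((S.toList.reverse.dropWhile (fun c => c == 'a')).reverse)

def solution_alt (S : String) : Int :=
  if PySem.Str.isIn "aaa" S then -1
  else
    let n : Int := PySem.Str.len S
    let na : Int := (PySem.Str.count S "a" : Int)
    let tail : Int := n - PySem.Str.len (pyRstripA S)
    let answer : Int := 2 * (n - na) - (na - tail)
    if !(PySem.Str.endswith S "a") then answer + 2 else answer

-- ===== PRECONDITION & SPEC =====
-- Pre_ excludes only the empty string, on which A raises IndexError at S[-1].
def Pre_solution (S : String) : Prop := S ≠ ""
instance (S : String) : Decidable (Pre_solution S) := by unfold Pre_solution; infer_instance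

def pvWitness_solution : String := "aabca"

def Spec_solution (S : String) (out : Int) : Prop := out = solution_alt S
instance (S : String) (out : Int) : Decidable (Spec_solution S out) := by unfold Spec_solution; infer_instance

-- ===== CLAIM (what is proved, stated in full; the proofs are below) =====
def Claim_equal_solution : Prop := ∀ (S : String), Dom_solution S → Pre_solution S → Spec_solution S (solution S)

-- ===== LEMMAS AND PROOFS =====

-- proof-side bridge: one step of a straightforward run-length counting pass
def bStep (p : Int × Int) (ch : Char) : Int × Int :=
  if ch = 'a' then (p.1, p.2 + 1) else (p.1 + max 0 (2 - p.2), 0)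

-- B's early-return condition, computed the way A's loop meets it: scanning with a
-- pending run of `run` consecutive 'a's, does some run reach length 3?
def hasRun3 : Nat → List Char → Bool
  | _, [] => false
  | run, c :: rest => if c = 'a' then (decide (run + 1 = 3)) || hasRun3 (run + 1) rest
                      else hasRun3 0 rest

-- trailing 'a'-run length of `cs` when a run of `run` 'a's is already pending
def tailRunN : Nat → List Char → Nat
  | run, [] => run
  | run, c :: rest => if c = 'a' then tailRunN (run + 1) rest else tailRunN 0 rest

lemma aWhile_replicate (answer : Int) (run : Nat) (h : run ≤ 2) :
    (aWhile answer (List.replicate run 'a')).1 = answer + (2 - (run : Int)) := by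
  interval_cases run <;> simp [aWhile] <;> ring

-- main invariant: A's loop on stack = run pending 'a's equals the counting pass,
-- unless a run of three 'a's occurs
lemma aLoop_eq (cs : List Char) : ∀ (answer : Int) (run : Nat), run ≤ 2 →
    aLoop cs answer (List.replicate run 'a') =
      if hasRun3 run cs then .inl (-1)
      else .inr (cs.foldl bStep (answer, (run : Int))).1 := by
  induction cs with
  | nil => intro answer run h; simp [aLoop, hasRun3]
  | cons c rest ih =>
    intro answer run h
    by_cases hc : c = 'a'
    · subst hc
      by_cases h3 : run + 1 = 3
      · simp [aLoop, hasRun3, h3, ← List.replicate_succ']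
      · have hlt : ¬ (3 ≤ run + 1) := by omega
        have := ih answer (run + 1) (by omega)
        simp [aLoop, hasRun3, h3, hlt, ← List.replicate_succ', this, bStep,
              Nat.cast_add, Nat.cast_one]
    · have hmax : max 0 (2 - (run : Int)) = 2 - (run : Int) := by omega
      by_cases h2 : run < 2
      · have := ih (answer + (2 - (run : Int))) 0 (by omega)
        simp [aLoop, hasRun3, hc, h2, aWhile_replicate answer run h, bStep, hmax]
        simpa using this
      · have hrun : run = 2 := by omega
        subst hrun
        have := ih answer 0 (by omega)
        simp [aLoop, hasRun3, hc, bStep]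
        simpa using this

-- hasRun3 run cs holds iff cs begins with the (3 - run) missing 'a's or contains 'aaa'
lemma hasRun3_iff (cs : List Char) : ∀ (run : Nat), run ≤ 2 →
    (hasRun3 run cs = true ↔
      List.replicate (3 - run) 'a' <+: cs ∨ ['a', 'a', 'a'] <:+: cs) := by
  induction cs with
  | nil =>
    intro run h
    simp [hasRun3]
    omega
  | cons c rest ih =>
    intro run h
    by_cases hc : c = 'a'
    · subst hc
      by_cases h3 : run + 1 = 3
      · have hrun : run = 2 := by omega
        subst hrun
        simp [hasRun3, List.replicate_succ]
      · have hrep : (3 - run) = (3 - (run + 1)) + 1 := by omega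
        simp [hasRun3, h3, ih (run + 1) (by omega), hrep, List.replicate_succ]
        rw [List.infix_cons_iff]
        constructor
        · rintro (hp | hi)
          · exact Or.inl hp
          · exact Or.inr (Or.inr hi)
        · rintro (hp | haaa | hi)
          · exact Or.inl hp
          · left
            have h2 : List.replicate 2 'a' <+: rest := by
              rw [List.cons_prefix_cons] at haaa
              simpa using haaa.2
            have hsplit : List.replicate 2 'a'
                = List.replicate (2 - run) 'a' ++ List.replicate run 'a' := by
              rw [← List.replicate_add]
              congr 1
              omega
            exact ((hsplit ▸ (List.prefix_append _ _) : List.replicate (2 - run) 'a' <+: List.replicate 2 'a')).trans h2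
          · exact Or.inr hi
    · have hne : ¬ List.replicate (3 - run) 'a' <+: c :: rest := by
        intro hp
        have h1 : (3 - run) = (3 - run - 1) + 1 := by omega
        rw [h1, List.replicate_succ, List.cons_prefix_cons] at hp
        exact hc hp.1.symm
      have hne3 : ¬ (['a', 'a', 'a'] <+: c :: rest) := by
        intro hp; rw [List.cons_prefix_cons] at hp; exact hc hp.1.symm
      simp [hasRun3, hc, ih 0 (by omega), hne, List.infix_cons_iff, hne3]
      exact fun hp => hp.isInfix

lemma hasRun3_eq_isIn (cs : List Char) :
    hasRun3 0 cs = PySem.Chars.isIn ['a', 'a', 'a'] cs := by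
  by_cases hi : ['a', 'a', 'a'] <:+: cs
  · rw [(hasRun3_iff cs 0 (by omega)).2 (Or.inr hi), (PySem.Chars.isIn_iff_infix _ _).2 hi]
  · have h1 : hasRun3 0 cs ≠ true := by
      intro h
      rcases (hasRun3_iff cs 0 (by omega)).1 h with hp | h
      · exact hi (by simpa using hp.isInfix)
      · exact hi h
    have h2 := (PySem.Chars.isIn_eq_false_iff ['a', 'a', 'a'] cs).2 hi
    simp at h1; rw [h1, h2]

-- the counting pass in closed form, when no run of three 'a's occurs
lemma fold_closed (cs : List Char) : ∀ (answer : Int) (run : Nat), run ≤ 2 →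
    hasRun3 run cs = false →
    (cs.foldl bStep (answer, (run : Int))).1
      = answer + 2 * ((cs.length : Int) - cs.count 'a')
          - ((cs.count 'a' : Int) + run - tailRunN run cs) := by
  induction cs with
  | nil =>
    intro answer run h _
    simp [tailRunN]
  | cons c rest ih =>
    intro answer run h h3
    by_cases hc : c = 'a'
    · subst hc
      simp only [hasRun3, if_true, eq_self_iff_true, Bool.or_eq_false_iff,
        decide_eq_false_iff_not] at h3
      have hrw : (run : Int) + 1 = ((run + 1 : Nat) : Int) := by push_cast; ring
      have hih := ih answer (run + 1) (by omega) h3.2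
      simp only [List.foldl_cons, bStep, if_true, eq_self_iff_true, tailRunN,
        List.count_cons_self, List.length_cons]
      rw [hrw, hih]
      push_cast
      ring
    · simp only [hasRun3, if_neg hc] at h3
      have hmax : max 0 (2 - (run : Int)) = 2 - (run : Int) := by omega
      have hih := ih (answer + (2 - (run : Int))) 0 (by omega) h3
      simp only [Nat.cast_zero] at hih
      simp only [List.foldl_cons, bStep, if_neg hc, hmax, tailRunN,
        List.count_cons_of_ne (by simpa using hc), List.length_cons]
      rw [hih]
      push_cast
      ring

-- the takeWhile prefix is everything iff every element satisfies the predicate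
lemma takeWhile_len_iff {p : Char → Bool} (l : List Char) :
    (l.takeWhile p).length = l.length ↔ (∀ x ∈ l, p x) := by
  constructor
  · intro h x hx
    exact List.takeWhile_eq_self_iff.mp
      ((List.takeWhile_prefix p).eq_of_length h) x hx
  · intro h
    rw [List.takeWhile_eq_self_iff.mpr h]

-- tailRunN in terms of takeWhile on the reversed list
lemma tailRunN_eq (cs : List Char) : ∀ (run : Nat),
    tailRunN run cs = if cs.all (fun c => c == 'a') then run + cs.length
                      else (cs.reverse.takeWhile (fun c => c == 'a')).length := by
  induction cs with
  | nil => intro run; simp [tailRunN]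
  | cons c rest ih =>
    intro run
    by_cases hall : ∀ x ∈ rest, (x == 'a') = true
    · have hallb : rest.all (fun c => c == 'a') = true := List.all_eq_true.mpr hall
      by_cases hc : c = 'a'
      · subst hc
        have h1 : ('a' :: rest).all (fun c => c == 'a') = true := by
          simp [List.all_eq_true]
          intro x hx
          simpa using hall x hx
        rw [if_pos h1]
        have houter : tailRunN run ('a' :: rest) = tailRunN (run + 1) rest := by
          simp [tailRunN]
        rw [houter, ih, if_pos hallb, List.length_cons]
        omega
      · have h1 : (c :: rest).all (fun c => c == 'a') = false := by
          simp only [Bool.eq_false_iff]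
          intro hcontra
          exact hc (by simpa using List.all_eq_true.mp hcontra c List.mem_cons_self)
        rw [if_neg (by simp [h1])]
        have houter : tailRunN run (c :: rest) = tailRunN 0 rest := by
          simp [tailRunN, hc]
        rw [houter, ih, if_pos hallb, List.reverse_cons, List.takeWhile_append]
        have hlen : (rest.reverse.takeWhile (fun c => c == 'a')).length = rest.reverse.length :=
          (takeWhile_len_iff rest.reverse).mpr (fun x hx => hall x (by simpa using hx))
        rw [if_pos (by simpa using hlen)]
        have hcb : (c == 'a') = false := by simpa using hc
        simp [List.takeWhile_cons, hcb]
    · have hallb : rest.all (fun c => c == 'a') = false := by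
        simp only [Bool.eq_false_iff]
        intro hcontra
        exact hall (List.all_eq_true.mp hcontra)
      have h1 : (c :: rest).all (fun c => c == 'a') = false := by
        simp only [Bool.eq_false_iff]
        intro hcontra
        exact hall (fun x hx => List.all_eq_true.mp hcontra x (List.mem_cons_of_mem _ hx))
      have hlen : ¬ ((rest.reverse.takeWhile (fun c => c == 'a')).length = rest.reverse.length) := by
        intro hcontra
        exact hall (fun x hx => (takeWhile_len_iff rest.reverse).mp hcontra x (by simpa using hx))
      rw [if_neg (by simp [h1]), List.reverse_cons, List.takeWhile_append,
        if_neg (by simpa using hlen)]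
      by_cases hc : c = 'a'
      · subst hc
        have houter : tailRunN run ('a' :: rest) = tailRunN (run + 1) rest := by
          simp [tailRunN]
        rw [houter, ih, if_neg (by simp [hallb])]
      · have houter : tailRunN run (c :: rest) = tailRunN 0 rest := by
          simp [tailRunN, hc]
        rw [houter, ih, if_neg (by simp [hallb])]

lemma tailRunN_zero (cs : List Char) :
    tailRunN 0 cs = (cs.reverse.takeWhile (fun c => c == 'a')).length := by
  rw [tailRunN_eq]
  split_ifs with hall
  · rw [List.takeWhile_eq_self_iff.mpr, List.length_reverse]
    · omega
    · intro x hx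
      exact List.all_eq_true.mp hall x (by simpa using hx)
  · rfl

-- Python's S.count('a') counts the occurrences of the character 'a'
lemma countGo_singleton (v : Char) : ∀ (fuel : Nat) (l : List Char) (acc : Nat),
    l.length ≤ fuel → PySem.Chars.count.go [v] fuel l acc = acc + l.count v := by
  intro fuel
  induction fuel with
  | zero =>
    intro l acc h
    have hl : l = [] := List.length_eq_zero_iff.mp (by omega)
    subst hl
    simp [PySem.Chars.count.go]
  | succ n ih =>
    intro l acc h
    cases l with
    | nil => simp [PySem.Chars.count.go]
    | cons c t =>
      by_cases hc : c = v
      · subst hc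
        have hpre : [c].isPrefixOf (c :: t) = true := by simp [List.isPrefixOf]
        simp only [PySem.Chars.count.go, hpre, if_true, List.length_cons, List.drop_succ_cons,
          List.length_nil, List.drop_zero]
        rw [ih t (acc + 1) (by simpa [Nat.succ_le_succ_iff] using h)]
        simp [List.count_cons_self]
        omega
      · have hpre : [v].isPrefixOf (c :: t) = false := by
          simp [List.isPrefixOf, Ne.symm hc]
        simp only [PySem.Chars.count.go, hpre, Bool.false_eq_true, if_false]
        rw [ih t acc (by simpa [Nat.succ_le_succ_iff] using h)]
        simp [List.count_cons, hc]

lemma count_char (cs : List Char) (v : Char) :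
    PySem.Chars.count cs [v] = cs.count v := by
  simp [PySem.Chars.count, countGo_singleton v cs.length cs 0 le_rfl]

-- last element of a nonempty list, as Python's S[-1] and S.endswith('a') see it
lemma pyGet_neg_one (cs : List Char) (h : cs ≠ []) :
    PySem.List.pyGet? cs (-1) = cs.getLast? := by
  have hlen : 0 < cs.length := List.length_pos_iff.mpr h
  have h1 : ¬ (0 : Int) ≤ -1 := by omega
  have h2 : -(cs.length : Int) ≤ -1 := by omega
  simp only [PySem.List.pyGet?, PySem.List.pyIdx?, if_neg h1, if_pos h2]
  have h3 : ((-(-1 : Int)).toNat) = 1 := by decide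
  rw [h3, List.getLast?_eq_getElem?]
  rfl

lemma endswith_last (cs : List Char) (h : cs ≠ []) :
    PySem.Chars.endswith cs ['a'] = true ↔ cs.getLast? = some 'a' := by
  rw [PySem.Chars.endswith_iff]
  constructor
  · rintro ⟨t, rfl⟩
    exact List.getLast?_concat
  · intro hl
    refine ⟨cs.dropLast, ?_⟩
    have hd := List.dropLast_append_getLast h
    have hg : cs.getLast h = 'a' := by
      rw [List.getLast?_eq_some_getLast h] at hl
      exact Option.some.inj hl
    rw [← hg]
    exact hd

-- ===== VERDICT (by name: the statement is the Claim_ definition above) =====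
theorem solution_spec : Claim_equal_solution := by
  intro S _ hpre
  unfold Spec_solution solution solution_alt
  have hcs : S.toList ≠ [] := fun hnil => hpre (String.toList_eq_nil_iff.mp hnil)
  have hin : PySem.Str.isIn "aaa" S = hasRun3 0 S.toList := by
    rw [hasRun3_eq_isIn]
    have hl : "aaa".toList = ['a', 'a', 'a'] := rfl
    simp [PySem.Str.isIn, hl]
  have hloop := aLoop_eq S.toList 0 0 (by omega)
  simp only [List.replicate_zero, Nat.cast_zero] at hloop
  rw [hloop, hin]
  by_cases hcase : hasRun3 0 S.toList
  · simp [hcase]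
  · simp only [hcase, Bool.false_eq_true, if_false]
    have hfold := fold_closed S.toList 0 0 (by omega) (by simpa using hcase)
    simp only [Nat.cast_zero] at hfold
    have hcount : (PySem.Str.count S "a" : Int) = (S.toList.count 'a' : Int) := by
      have h0 : PySem.Str.count S "a" = PySem.Chars.count S.toList "a".toList := by
        simp [PySem.Str.count]
      rw [h0, show ("a".toList) = ['a'] from rfl, count_char]
    have hlen : PySem.Str.len S = (S.toList.length : Int) := by
      simp [PySem.Str.len, PySem.Chars.len]
    have hsum : (S.toList.reverse.takeWhile (fun c => c == 'a')).length
          + (S.toList.reverse.dropWhile (fun c => c == 'a')).length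
        = S.toList.length := by
      have h0 := congrArg List.length
        (List.takeWhile_append_dropWhile (p := fun c => c == 'a') (l := S.toList.reverse))
      rw [List.length_append, List.length_reverse] at h0
      exact h0
    have hrstrip : PySem.Str.len (pyRstripA S)
        = ((S.toList.reverse.dropWhile (fun c => c == 'a')).length : Int) := by
      simp [pyRstripA, PySem.Str.len, PySem.Chars.len]
    have htail := tailRunN_zero S.toList
    have hget := pyGet_neg_one S.toList hcs
    have hend := endswith_last S.toList hcs
    have hendeq : PySem.Str.endswith S "a" = PySem.Chars.endswith S.toList ['a'] := by
      simp [PySem.Str.endswith]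
    rw [show PySem.Str.pyGet? S (-1) = PySem.List.pyGet? S.toList (-1) from by
          simp [PySem.Str.pyGet?],
        hget]
    cases hlast : S.toList.getLast? with
    | none => exact absurd (List.getLast?_eq_none_iff.mp hlast) hcs
    | some c =>
      by_cases hca : c = 'a'
      · subst hca
        have hew : PySem.Str.endswith S "a" = true := by
          rw [hendeq]; exact hend.mpr hlast
        simp only [hew, hfold, htail, Bool.not_true, Bool.false_eq_true, if_false, ne_eq,
          not_true_eq_false]
        rw [hcount, hlen, hrstrip]
        omega
      · have hew : PySem.Str.endswith S "a" = false := by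
          rw [hendeq, Bool.eq_false_iff]
          intro ht
          exact hca (by simpa [hlast] using hend.mp ht)
        simp only [hew, hfold, htail, Bool.not_false, if_true, ne_eq, hca, not_false_eq_true]
        rw [hcount, hlen, hrstrip]
        omega
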